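-- pv_equiv track=rewrite | github.com/zouyu9631/cp_for_fun | atcoder/contest/arc197/d/d.py | rowBlocks
-- ===== SOURCE A (Python) =====
-- def rowBlocks(mat):
--     repId, reps, sz, bel = {}, [], [], []
--     for i, row in enumerate(mat):
--         key = tuple(row)
--         if key not in repId:
--             bid = len(reps)
--             repId[key] = bid
--             reps.append(i)
--             sz.append(0)
--         bid = repId[key]
--         bel.append(bid)
--         sz[bid] += 1
--     return reps, sz, bel
-- ===== SOURCE B (Python) =====
-- def rowBlocks(mat):
--     # dictionary-free brute force: ordered dedup of the rows, then every answer
--     # is read off with plain list scans (index / count)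
--     rows = [tuple(r) for r in mat]
--     firsts = []
--     for r in rows:
--         if r not in firsts:
--             firsts.append(r)
--     reps = [rows.index(r) for r in firsts]
--     sz = [rows.count(r) for r in firsts]
--     bel = [firsts.index(r) for r in rows]
--     return reps, sz, bel
-- ===== Notes on version B (the rewrite author's own statement) =====
-- stated objective: simpler
-- what changed: A incrementally maintains a hash dict of rep ids together with running reps/size/membership accumulators in one pass; B uses no dictionary at all: it builds the ordered list of distinct rows with a membership scan and then reads reps, sizes and membership straight off with list.index/list.count scans.
import Mathlib
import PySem

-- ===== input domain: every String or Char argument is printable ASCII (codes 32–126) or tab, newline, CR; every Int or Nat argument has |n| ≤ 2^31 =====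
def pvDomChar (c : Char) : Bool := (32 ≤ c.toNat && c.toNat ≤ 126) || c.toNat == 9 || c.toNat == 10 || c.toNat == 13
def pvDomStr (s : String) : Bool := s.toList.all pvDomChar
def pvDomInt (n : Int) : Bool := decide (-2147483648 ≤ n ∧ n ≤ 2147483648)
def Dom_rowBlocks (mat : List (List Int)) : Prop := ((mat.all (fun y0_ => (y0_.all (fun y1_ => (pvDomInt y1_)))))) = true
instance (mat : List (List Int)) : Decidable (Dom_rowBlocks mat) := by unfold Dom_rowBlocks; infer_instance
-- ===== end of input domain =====

-- B drops A's hash dict entirely: it builds the ordered list of distinct rows with a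
-- membership scan and reads reps/sizes/membership off it with plain list index/count scans.


-- ===== PORT A =====
-- one loop body of A: update repId/reps/sz on a fresh key, then append the bid and bump its size
def rowBlocksStep (st : PySem.Dict (List Int) Int × List Int × List Int × List Int)
    (p : Int × List Int) : PySem.Dict (List Int) Int × List Int × List Int × List Int :=
  let repId := st.1
  let reps := st.2.1
  let sz := st.2.2.1
  let bel := st.2.2.2
  let t := if repId.contains p.2 then (repId, reps, sz)
           else (repId.insert p.2 (reps.length : Int), reps ++ [p.1], sz ++ [(0 : Int)])
  let bid := t.1.getD p.2 0            -- repId[key]: the key is always present here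
  -- sz[bid] += 1: exact, since 0 ≤ bid < len(sz) always holds at this point
  (t.1, t.2.1, t.2.2.modify bid.toNat (· + 1), bel ++ [bid])

def rowBlocks (mat : List (List Int)) : List Int × List Int × List Int :=
  let st := (PySem.List.enumerate mat).foldl rowBlocksStep (PySem.Dict.empty, [], [], [])
  (st.2.1, st.2.2.1, st.2.2.2)

-- ===== PORT B =====
def rowBlocks_alt (mat : List (List Int)) : List Int × List Int × List Int :=
  let rows := mat     -- tuple(r) for the rows: identity under the type convention
  let firsts := rows.foldl (fun acc r => if r ∈ acc then acc else acc ++ [r]) []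
  let reps := firsts.map (fun r => (((PySem.List.index? rows r).getD 0 : Nat) : Int))
      -- rows.index(r): r is always a member, so .getD 0 is exact
  let sz := firsts.map (fun r => (PySem.List.count rows r : Int))
  let bel := rows.map (fun r => (((PySem.List.index? firsts r).getD 0 : Nat) : Int))
      -- firsts.index(r): r is always a member, so .getD 0 is exact
  (reps, sz, bel)

-- ===== PRECONDITION & SPEC =====
def Spec_rowBlocks (mat : List (List Int)) (out : List Int × List Int × List Int) : Prop := out = rowBlocks_alt mat
instance (mat : List (List Int)) (out : List Int × List Int × List Int) : Decidable (Spec_rowBlocks mat out) := by unfold Spec_rowBlocks; infer_instance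

-- ===== CLAIM (what is proved, stated in full; the proofs are below) =====
def Claim_equal_rowBlocks : Prop := ∀ (mat : List (List Int)), Dom_rowBlocks mat → Spec_rowBlocks mat (rowBlocks mat)

-- ===== LEMMAS AND PROOFS =====

-- items-level model of A's grouping behaviour
def keysOf (L : List (List Int × List Int)) : List (List Int) := L.map (·.1)

def gstep (L : List (List Int × List Int)) (p : Int × List Int) : List (List Int × List Int) :=
  if p.2 ∈ keysOf L then L.map (fun q => if q.1 = p.2 then (q.1, q.2 ++ [p.1]) else q)
  else L ++ [(p.2, [p.1])]

-- the dict mapping the k-th key of ks to k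
def mkBid (ks : List (List Int)) : PySem.Dict (List Int) Int :=
  PySem.Dict.mk ((PySem.List.enumerate ks).map (fun p => (p.2, p.1)))

def repsOf (L : List (List Int × List Int)) : List Int := L.map (fun q => q.2.headD 0)
def szOf (L : List (List Int × List Int)) : List Int := L.map (fun q => (q.2.length : Int))

-- B-side model: ordered dedup and occurrence-index lists
def dedupF (xs : List (List Int)) : List (List Int) :=
  xs.foldl (fun acc r => if r ∈ acc then acc else acc ++ [r]) []

def occ (xs : List (List Int)) (k : List Int) : List Int :=
  ((PySem.List.enumerate xs).filter (fun p => p.2 == k)).map (·.1)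

theorem keys_mkBid (ks : List (List Int)) : (mkBid ks).keys = ks := by
  simp [mkBid, PySem.Dict.keys_mk, List.map_map, Function.comp_def, PySem.List.map_snd_enumerate]

theorem contains_mkBid (ks : List (List Int)) (row : List Int) :
    (mkBid ks).contains row = decide (row ∈ ks) := by
  rw [PySem.Dict.contains_eq_decide_mem_keys, keys_mkBid]

theorem getD_mkBid (ks : List (List Int)) (row : List Int) (hnd : ks.Nodup) (hm : row ∈ ks) :
    (mkBid ks).getD row 0 = ((ks.idxOf row : Nat) : Int) := by
  have hlt : ks.idxOf row < ks.length := List.idxOf_lt_length_of_mem hm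
  apply PySem.Dict.getD_of_mem_items
  · simp only [mkBid]
    refine List.mem_map.mpr ⟨(((ks.idxOf row : Nat) : Int), row), ?_, rfl⟩
    rw [PySem.List.mem_enumerate_iff]
    exact ⟨ks.idxOf row, hlt, by simp [List.getElem_idxOf]⟩
  · rw [keys_mkBid]; exact hnd

theorem mkBid_append (ks : List (List Int)) (row : List Int) (h : row ∉ ks) :
    (mkBid ks).insert row (ks.length : Int) = mkBid (ks ++ [row]) := by
  apply PySem.Dict.ext
  rw [PySem.Dict.items_insert_of_not_contains _ _ (by simp [contains_mkBid, h])]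
  simp [mkBid, PySem.List.enumerate_append, PySem.List.enumerate_cons, PySem.List.enumerate_nil]

theorem keysOf_gstep (L : List (List Int × List Int)) (p : Int × List Int) :
    keysOf (gstep L p) = if p.2 ∈ keysOf L then keysOf L else keysOf L ++ [p.2] := by
  by_cases h : p.2 ∈ keysOf L
  · rw [gstep, if_pos h, if_pos h]
    simp only [keysOf, List.map_map]
    apply List.map_congr_left
    intro q _
    by_cases hq : q.1 = p.2 <;> simp [hq]
  · rw [gstep, if_neg h, if_neg h]; simp [keysOf]

theorem keysOf_foldl_prefix (ps : List (Int × List Int)) (L : List (List Int × List Int)) :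
    ∃ ext, keysOf (ps.foldl gstep L) = keysOf L ++ ext := by
  induction ps generalizing L with
  | nil => exact ⟨[], by simp⟩
  | cons p ps ih =>
    obtain ⟨ext, hext⟩ := ih (gstep L p)
    rw [List.foldl_cons, hext, keysOf_gstep]
    by_cases h : p.2 ∈ keysOf L
    · exact ⟨ext, by rw [if_pos h]⟩
    · exact ⟨p.2 :: ext, by rw [if_neg h]; simp⟩

theorem idxOf_stable (ps : List (Int × List Int)) (L : List (List Int × List Int))
    (row : List Int) (hm : row ∈ keysOf L) :
    (keysOf (ps.foldl gstep L)).idxOf row = (keysOf L).idxOf row := by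
  obtain ⟨ext, hext⟩ := keysOf_foldl_prefix ps L
  rw [hext, List.idxOf_append, if_pos hm]

theorem nodup_gstep (L : List (List Int × List Int)) (p : Int × List Int)
    (h : (keysOf L).Nodup) : (keysOf (gstep L p)).Nodup := by
  rw [keysOf_gstep]
  by_cases hm : p.2 ∈ keysOf L
  · rwa [if_pos hm]
  · rw [if_neg hm]
    refine List.nodup_append.mpr ⟨h, List.nodup_singleton _, ?_⟩
    intro a ha b hb
    rw [List.mem_singleton] at hb
    subst hb
    exact fun heq => hm (heq ▸ ha)

theorem nonempty_gstep (L : List (List Int × List Int)) (p : Int × List Int)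
    (h : ∀ q ∈ L, q.2 ≠ []) : ∀ q ∈ gstep L p, q.2 ≠ [] := by
  intro q hq
  rw [gstep] at hq
  by_cases hm : p.2 ∈ keysOf L
  · rw [if_pos hm] at hq
    obtain ⟨r, hr, hrq⟩ := List.mem_map.mp hq
    by_cases hr1 : r.1 = p.2
    · rw [if_pos hr1] at hrq; rw [← hrq]; simp
    · rw [if_neg hr1] at hrq; rw [← hrq]; exact h r hr
  · rw [if_neg hm] at hq
    rcases List.mem_append.mp hq with h1 | h2
    · exact h q h1
    · simp at h2; subst h2; simp

theorem modify_append_length (xs : List Int) (a : Int) (f : Int → Int) :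
    (xs ++ [a]).modify xs.length f = xs ++ [f a] := by
  induction xs with
  | nil => simp [List.modify_cons]
  | cons x xs ih => simp [ih]

theorem szOf_modify (L : List (List Int × List Int)) (i : Int) (row : List Int)
    (hnd : (keysOf L).Nodup) (hm : row ∈ keysOf L) :
    (szOf L).modify ((keysOf L).idxOf row) (· + 1) =
      szOf (L.map (fun q => if q.1 = row then (q.1, q.2 ++ [i]) else q)) := by
  have hlt : (keysOf L).idxOf row < (keysOf L).length := List.idxOf_lt_length_of_mem hm
  have hlen : (keysOf L).length = L.length := by simp [keysOf]
  apply List.ext_getElem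
  · simp [szOf]
  · intro j h1 h2
    have hj : j < L.length := by simpa [szOf] using h2
    rw [List.getElem_modify]
    have hjk : j < (keysOf L).length := by omega
    by_cases hij : (keysOf L).idxOf row = j
    · have hj1 : L[j].1 = row := by
        have h2 : (keysOf L)[j]'hjk = row := by
          subst hij; exact List.getElem_idxOf hlt
        simpa [keysOf] using h2
      simp [szOf, hij, hj1]
    · have hj1 : L[j].1 ≠ row := by
        intro hcon
        apply hij
        have hrowj : (keysOf L)[j]'hjk = row := by simpa [keysOf] using hcon
        have h3 := List.getElem_idxOf (x := row) (xs := keysOf L) hlt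
        exact hnd.getElem_inj_iff.mp (h3.trans hrowj.symm)
      simp [szOf, hj1, hij]

theorem main_invariant (ps : List (Int × List Int)) (L : List (List Int × List Int))
    (bel0 : List Int) (hnd : (keysOf L).Nodup) (hne : ∀ q ∈ L, q.2 ≠ []) :
    ps.foldl rowBlocksStep (mkBid (keysOf L), repsOf L, szOf L, bel0) =
      (mkBid (keysOf (ps.foldl gstep L)), repsOf (ps.foldl gstep L), szOf (ps.foldl gstep L),
       bel0 ++ ps.map (fun p => (((keysOf (ps.foldl gstep L)).idxOf p.2 : Nat) : Int))) := by
  induction ps generalizing L bel0 with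
  | nil => simp
  | cons p ps ih =>
    by_cases hm : p.2 ∈ keysOf L
    · -- existing key: dict, reps unchanged; size bumped at the key's index
      have hstep : rowBlocksStep (mkBid (keysOf L), repsOf L, szOf L, bel0) p =
          (mkBid (keysOf L), repsOf L,
           (szOf L).modify ((keysOf L).idxOf p.2) (· + 1),
           bel0 ++ [(((keysOf L).idxOf p.2 : Nat) : Int)]) := by
        rw [rowBlocksStep]
        simp only [contains_mkBid, hm, decide_true, if_true]
        rw [getD_mkBid _ _ hnd hm]
        simp
      have hg : gstep L p = L.map (fun q => if q.1 = p.2 then (q.1, q.2 ++ [p.1]) else q) := by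
        rw [gstep, if_pos hm]
      have hk : keysOf (gstep L p) = keysOf L := by rw [keysOf_gstep, if_pos hm]
      have hr : repsOf (gstep L p) = repsOf L := by
        rw [hg, repsOf, List.map_map, repsOf]
        apply List.map_congr_left
        intro q hq
        by_cases hq1 : q.1 = p.2
        · obtain ⟨x, t, ht⟩ := List.exists_cons_of_ne_nil (hne q hq)
          simp [hq1, ht]
        · simp [hq1]
      have hs : szOf (gstep L p) = (szOf L).modify ((keysOf L).idxOf p.2) (· + 1) := by
        rw [hg, ← szOf_modify L p.1 p.2 hnd hm]
      simp only [List.foldl_cons, List.map_cons]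
      rw [hstep, ← hs, ← hr, ← hk,
        ih (gstep L p) _ (nodup_gstep L p hnd) (nonempty_gstep L p hne)]
      have hidx : (((keysOf (List.foldl gstep (gstep L p) ps)).idxOf p.2 : Nat) : Int)
          = (((keysOf (gstep L p)).idxOf p.2 : Nat) : Int) := by
        rw [idxOf_stable _ _ _ (by rw [hk]; exact hm)]
      conv_rhs => rw [List.append_cons]
      rw [hidx]
    · -- fresh key: appended to dict/reps/sz, bid = old length
      have hlen : (repsOf L).length = (keysOf L).length := by simp [repsOf, keysOf]
      have hszlen : (szOf L).length = L.length := by simp [szOf]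
      have hstep : rowBlocksStep (mkBid (keysOf L), repsOf L, szOf L, bel0) p =
          (mkBid (keysOf L ++ [p.2]), repsOf L ++ [p.1], szOf L ++ [(1 : Int)],
           bel0 ++ [((L.length : Nat) : Int)]) := by
        rw [rowBlocksStep]
        simp only [contains_mkBid, hm, decide_false, Bool.false_eq_true, if_false]
        rw [hlen, mkBid_append _ _ hm]
        have hbid : (mkBid (keysOf L ++ [p.2])).getD p.2 0 = ((keysOf L).length : Int) := by
          rw [← mkBid_append _ _ hm, PySem.Dict.getD_insert_self]
        rw [hbid]
        have : (((keysOf L).length : Int)).toNat = (szOf L).length := by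
          simp [keysOf, szOf]
        rw [this, modify_append_length]
        simp [keysOf, szOf]
      have hg : gstep L p = L ++ [(p.2, [p.1])] := by rw [gstep, if_neg hm]
      have hk : keysOf (gstep L p) = keysOf L ++ [p.2] := by rw [keysOf_gstep, if_neg hm]
      have hnd' : (keysOf (gstep L p)).Nodup := nodup_gstep L p hnd
      have hne' : ∀ q ∈ gstep L p, q.2 ≠ [] := nonempty_gstep L p hne
      have hr : repsOf (gstep L p) = repsOf L ++ [p.1] := by simp [hg, repsOf]
      have hs : szOf (gstep L p) = szOf L ++ [(1 : Int)] := by simp [hg, szOf]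
      simp only [List.foldl_cons, List.map_cons]
      rw [hstep, ← hs, ← hr, ← hk, ih (gstep L p) _ hnd' hne']
      have hidx : (((keysOf (List.foldl gstep (gstep L p) ps)).idxOf p.2 : Nat) : Int)
          = ((L.length : Nat) : Int) := by
        rw [idxOf_stable _ _ _ (by rw [hk]; simp), hk, List.idxOf_append, if_neg hm]
        simp [keysOf]
      conv_rhs => rw [List.append_cons]
      rw [hidx]

theorem mem_keysOf_foldl (ps : List (Int × List Int)) (L : List (List Int × List Int))
    (p : Int × List Int) (hp : p ∈ ps) : p.2 ∈ keysOf (ps.foldl gstep L) := by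
  induction ps generalizing L with
  | nil => cases hp
  | cons q ps ih =>
    rw [List.foldl_cons]
    rcases List.mem_cons.mp hp with hp | hp
    · subst hp
      obtain ⟨ext, hext⟩ := keysOf_foldl_prefix ps (gstep L p)
      rw [hext]
      refine List.mem_append.mpr (Or.inl ?_)
      rw [keysOf_gstep]
      by_cases hm : p.2 ∈ keysOf L
      · rwa [if_pos hm]
      · rw [if_neg hm]; simp
    · exact ih (gstep L q) hp

-- snoc formula for the ordered dedup
theorem dedupF_append (xs : List (List Int)) (r : List Int) :
    dedupF (xs ++ [r]) = if r ∈ dedupF xs then dedupF xs else dedupF xs ++ [r] := by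
  simp [dedupF]

theorem mem_dedupF (xs : List (List Int)) (x : List Int) : x ∈ dedupF xs ↔ x ∈ xs := by
  induction xs using List.reverseRecOn with
  | nil => simp [dedupF]
  | append_singleton xs r ih =>
    rw [dedupF_append]
    by_cases hm : r ∈ dedupF xs
    · rw [if_pos hm]
      simp only [List.mem_append, List.mem_singleton, ih]
      constructor
      · exact Or.inl
      · rintro (h | h)
        · exact h
        · subst h; exact ih.mp hm
    · rw [if_neg hm]; simp [ih]

theorem occ_append (xs : List (List Int)) (r k : List Int) :
    occ (xs ++ [r]) k = occ xs k ++ (if r = k then [((xs.length : Nat) : Int)] else []) := by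
  rw [occ, PySem.List.enumerate_append, List.filter_append, List.map_append, occ]
  congr 1
  by_cases h : r = k <;>
    simp [PySem.List.enumerate_cons, PySem.List.enumerate_nil, h]

-- the grouping fold seen group-by-group: final groups = dedup keys with their occurrence lists
theorem groups_eq (xs : List (List Int)) :
    (PySem.List.enumerate xs).foldl gstep [] =
      (dedupF xs).map (fun k => (k, occ xs k)) := by
  induction xs using List.reverseRecOn with
  | nil => simp [dedupF, PySem.List.enumerate_nil]
  | append_singleton xs r ih =>
    rw [PySem.List.enumerate_append, List.foldl_append, ih,
      PySem.List.enumerate_cons, PySem.List.enumerate_nil]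
    simp only [List.foldl_cons, List.foldl_nil]
    have hkeys : keysOf ((dedupF xs).map (fun k => (k, occ xs k))) = dedupF xs := by
      simp [keysOf, List.map_map, Function.comp_def]
    rw [dedupF_append]
    by_cases hm : r ∈ dedupF xs
    · rw [if_pos hm, gstep, if_pos (by rw [hkeys]; exact hm)]
      rw [List.map_map]
      apply List.map_congr_left
      intro k _
      by_cases hk : k = r
      · simp [hk, occ_append]
      · have hrk : ¬ (r = k) := fun h => hk h.symm
        simp [hk, occ_append, hrk]
    · rw [if_neg hm, gstep, if_neg (by rw [hkeys]; exact hm)]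
      rw [List.map_append]
      congr 1
      · apply List.map_congr_left
        intro k hk
        have hkr : ¬ (r = k) := fun h => hm (h ▸ hk)
        simp [occ_append, hkr]
      · have hocc : occ xs r = [] := by
          rw [occ, List.map_eq_nil_iff, List.filter_eq_nil_iff]
          intro p hp
          obtain ⟨j, hj, hpj⟩ := (PySem.List.mem_enumerate_iff _ _ _).mp hp
          have : p.2 ∈ xs := by rw [hpj]; exact List.getElem_mem hj
          simp only [beq_iff_eq]
          exact fun h => hm ((mem_dedupF xs r).mpr (h ▸ this))
        simp [occ_append, hocc]

-- first element of the occurrence list = idxOf (via a start-offset generalisation)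
theorem occ_head_aux (xs : List (List Int)) (k : List Int) (s : Int) (hm : k ∈ xs) :
    ((((PySem.List.enumerate xs s).filter (fun p => p.2 == k)).map (·.1)).headD 0)
      = s + ((xs.idxOf k : Nat) : Int) := by
  induction xs generalizing s with
  | nil => cases hm
  | cons x xs ih =>
    rw [PySem.List.enumerate_cons]
    by_cases hx : x = k
    · simp [hx, List.idxOf_cons_self]
    · have hm' : k ∈ xs := by
        rcases List.mem_cons.mp hm with h | h
        · exact absurd h.symm hx
        · exact h
      rw [List.filter_cons, if_neg (by simp [hx]), ih (s + 1) hm',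
        List.idxOf_cons_ne _ (by simp [hx])]
      push_cast
      ring

theorem occ_headD (xs : List (List Int)) (k : List Int) (hm : k ∈ xs) :
    (occ xs k).headD 0 = ((xs.idxOf k : Nat) : Int) := by
  simpa [occ] using occ_head_aux xs k 0 hm

theorem countP_enumerate (xs : List (List Int)) (k : List Int) (s : Int) :
    (PySem.List.enumerate xs s).countP (fun p => p.2 == k) = xs.countP (fun x => x == k) := by
  induction xs generalizing s with
  | nil => simp [PySem.List.enumerate_nil]
  | cons x xs ih =>
    simp [PySem.List.enumerate_cons, List.countP_cons, ih]

theorem occ_length (xs : List (List Int)) (k : List Int) :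
    (occ xs k).length = xs.count k := by
  rw [occ, List.length_map, ← List.countP_eq_length_filter, countP_enumerate]
  rfl

theorem index?_getD_eq_idxOf (xs : List (List Int)) (v : List Int) (hm : v ∈ xs) :
    (PySem.List.index? xs v).getD 0 = xs.idxOf v := by
  induction xs with
  | nil => cases hm
  | cons x xs ih =>
    by_cases hx : x = v
    · subst hx
      rw [PySem.List.index?_cons_self, List.idxOf_cons_self]; rfl
    · have hm' : v ∈ xs := by
        rcases List.mem_cons.mp hm with h | h
        · exact absurd h.symm hx
        · exact h
      rw [PySem.List.index?_cons_of_ne _ hx, List.idxOf_cons_ne _ (by simp [hx])]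
      obtain ⟨n, hn⟩ := Option.isSome_iff_exists.mp
        ((PySem.List.index?_isSome_iff xs v).mpr hm')
      rw [hn]
      have := ih hm'
      rw [hn] at this
      simp_all

-- ===== VERDICT (by name: the statement is the Claim_ definition above) =====
theorem rowBlocks_spec : Claim_equal_rowBlocks := by
  intro mat _
  show rowBlocks mat = rowBlocks_alt mat
  set ps := PySem.List.enumerate mat with hps
  have hL := main_invariant ps [] [] (by simp [keysOf]) (by simp)
  have hG : ps.foldl gstep [] = (dedupF mat).map (fun k => (k, occ mat k)) := groups_eq mat
  have hkeys : keysOf (ps.foldl gstep []) = dedupF mat := by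
    rw [hG]; simp [keysOf, List.map_map, Function.comp_def]
  have hreps : repsOf (ps.foldl gstep []) =
      (dedupF mat).map (fun k => (((PySem.List.index? mat k).getD 0 : Nat) : Int)) := by
    rw [hG, repsOf, List.map_map]
    apply List.map_congr_left
    intro k hk
    have hm : k ∈ mat := (mem_dedupF mat k).mp hk
    show (occ mat k).headD 0 = (((PySem.List.index? mat k).getD 0 : Nat) : Int)
    rw [index?_getD_eq_idxOf mat k hm, occ_headD mat k hm]
  have hsz : szOf (ps.foldl gstep []) =
      (dedupF mat).map (fun k => ((PySem.List.count mat k : Nat) : Int)) := by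
    rw [hG, szOf, List.map_map]
    apply List.map_congr_left
    intro k _
    show ((occ mat k).length : Int) = ((PySem.List.count mat k : Nat) : Int)
    rw [occ_length]
    rfl
  have hbel : ps.map (fun p => (((keysOf (ps.foldl gstep [])).idxOf p.2 : Nat) : Int)) =
      mat.map (fun r => (((PySem.List.index? (dedupF mat) r).getD 0 : Nat) : Int)) := by
    have h1 : ps.map (fun p => (((keysOf (ps.foldl gstep [])).idxOf p.2 : Nat) : Int)) =
        ps.map (fun p => (((PySem.List.index? (dedupF mat) p.2).getD 0 : Nat) : Int)) := by
      apply List.map_congr_left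
      intro p hp
      have hm : p.2 ∈ dedupF mat := by
        rw [← hkeys]; exact mem_keysOf_foldl ps [] p hp
      rw [hkeys, index?_getD_eq_idxOf _ _ hm]
    rw [h1, ← PySem.List.map_snd_enumerate mat 0, ← hps, List.map_map]
    rfl
  rw [rowBlocks, rowBlocks_alt]
  rw [show ((PySem.Dict.empty : PySem.Dict (List Int) Int), ([] : List Int), ([] : List Int),
      ([] : List Int)) = (mkBid (keysOf []), repsOf [], szOf [], []) from rfl]
  simp only [← hps, hL, hreps, hsz, hbel]
  rfl
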